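-- pv_equiv track=rewrite | github.com/andrewbelles/population-density | analysis/hyperparameter.py | make_layer_choices
-- ===== SOURCE A (Python) =====
-- import optuna, itertools
--
-- def make_layer_choices(
--     sizes=(32, 64, 128, 256),
--     min_layers=1,
--     max_layers=3
-- ):
--     choices = {}
--     for L in range(min_layers, max_layers+1):
--         for combo in itertools.product(sizes, repeat=L):
--             if any(combo[i] < combo[i + 1] for i in range(len(combo) - 1)):
--                 continue
--             key = "-".join(str(x) for x in combo)
--             choices[key] = combo
--     return choices
-- ===== SOURCE B (Python) =====
-- def make_layer_choices(
--     sizes=(32, 64, 128, 256),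
--     min_layers=1,
--     max_layers=3
-- ):
--     # Generate the non-increasing tuples directly, level by level: each round
--     # extends the current rows only with values <= their last element, so no
--     # candidate is ever generated and then rejected.
--     choices = {}
--     if max_layers < min_layers:
--         return choices
--     rows = [()]
--     for length in range(max_layers + 1):
--         if length >= min_layers:
--             for combo in rows:
--                 choices["-".join(str(x) for x in combo)] = combo
--         rows = [r + (s,) for r in rows for s in sizes if not r or s <= r[-1]]
--     return choices
-- ===== Notes on version B (the rewrite author's own statement) =====
-- stated objective: alternative
-- what changed: B builds the non-increasing combinations directly, level by level (each round extends the current rows only with values <= their last element), instead of A's enumerate-the-full-cartesian-product-then-filter loop; rejected tuples are never generated. Pre_ excludes only inputs where A raises ValueError (negative min_layers with a nonempty layer range).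
import Mathlib
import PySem

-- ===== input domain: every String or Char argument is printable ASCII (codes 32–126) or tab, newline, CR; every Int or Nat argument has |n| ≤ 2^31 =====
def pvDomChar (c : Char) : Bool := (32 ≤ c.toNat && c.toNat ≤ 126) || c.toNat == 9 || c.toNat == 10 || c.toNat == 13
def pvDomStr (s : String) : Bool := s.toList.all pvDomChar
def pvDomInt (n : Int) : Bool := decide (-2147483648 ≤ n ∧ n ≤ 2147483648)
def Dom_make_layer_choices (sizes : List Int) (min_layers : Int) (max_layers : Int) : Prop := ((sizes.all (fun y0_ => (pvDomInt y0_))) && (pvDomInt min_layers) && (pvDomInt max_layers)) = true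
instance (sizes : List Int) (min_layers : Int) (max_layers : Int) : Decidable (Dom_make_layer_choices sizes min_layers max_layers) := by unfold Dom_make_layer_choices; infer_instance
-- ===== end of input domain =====

-- B builds the non-increasing combinations directly, level by level (each round extends
-- rows only with values ≤ their last element), instead of A's enumerate-the-full-product-
-- then-filter loop; return values proved equal wherever Python A returns (Pre_).


-- ===== PORT A =====
-- "-".join(str(x) for x in combo)
def pvKey (combo : List Int) : String :=
  PySem.Str.join "-" (combo.map PySem.Int.toStr)

-- itertools.product(sizes, repeat=L), in lexicographic (Python) order
def pvProd (sizes : List Int) : Nat → List (List Int)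
  | 0 => [[]]
  | n + 1 => sizes.flatMap (fun x => (pvProd sizes n).map (fun r => x :: r))

-- any(combo[i] < combo[i + 1] for i in range(len(combo) - 1))
def pvAnyInc (combo : List Int) : Bool :=
  (List.range (combo.length - 1)).any (fun i => decide (combo.getD i 0 < combo.getD (i + 1) 0))

def make_layer_choices (sizes : List Int) (min_layers : Int) (max_layers : Int) : List (String × List Int) :=
  ((PySem.List.pyRange min_layers (max_layers + 1) 1).foldl
    (fun d L =>
      (pvProd sizes L.toNat).foldl
        (fun d combo => if pvAnyInc combo then d else d.insert (pvKey combo) combo) d)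
    PySem.Dict.empty).items

-- ===== PORT B =====
-- not r or s <= r[-1]
def pvCond (r : List Int) (s : Int) : Bool :=
  match r.getLast? with
  | none => true
  | some b => decide (s ≤ b)

-- [r + (s,) for r in rows for s in sizes if not r or s <= r[-1]]
def pvExtend (sizes : List Int) (rows : List (List Int)) : List (List Int) :=
  rows.flatMap (fun r => sizes.flatMap (fun s => if pvCond r s then [r ++ [s]] else []))

-- body of B's 'for length in range(max_layers + 1)' loop: emit the current rows if
-- length >= min_layers, then extend them by one value
def pvStepB (sizes : List Int) (min_layers : Int)
    (st : PySem.Dict String (List Int) × List (List Int)) (length : Int) :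
    PySem.Dict String (List Int) × List (List Int) :=
  (if min_layers ≤ length then
      st.2.foldl (fun d combo => d.insert (pvKey combo) combo) st.1
    else st.1,
   pvExtend sizes st.2)

def make_layer_choices_alt (sizes : List Int) (min_layers : Int) (max_layers : Int) : List (String × List Int) :=
  if max_layers < min_layers then (PySem.Dict.empty : PySem.Dict String (List Int)).items else
  (((PySem.List.pyRange 0 (max_layers + 1) 1).foldl (pvStepB sizes min_layers)
      ((PySem.Dict.empty : PySem.Dict String (List Int)), [[]])).1).items

-- ===== PRECONDITION & SPEC =====
-- Pre_ excludes exactly the inputs where Python A raises: a negative min_layers with a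
-- nonempty layer range makes itertools.product(sizes, repeat=L) raise ValueError.
def Pre_make_layer_choices (sizes : List Int) (min_layers : Int) (max_layers : Int) : Prop :=
  0 ≤ min_layers ∨ max_layers < min_layers
instance (sizes : List Int) (min_layers : Int) (max_layers : Int) : Decidable (Pre_make_layer_choices sizes min_layers max_layers) := by unfold Pre_make_layer_choices; infer_instance

def pvWitness_make_layer_choices : List Int × Int × Int := ([32, 64], 1, 2)

def Spec_make_layer_choices (sizes : List Int) (min_layers : Int) (max_layers : Int) (out : List (String × List Int)) : Prop := out = make_layer_choices_alt sizes min_layers max_layers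
instance (sizes : List Int) (min_layers : Int) (max_layers : Int) (out : List (String × List Int)) : Decidable (Spec_make_layer_choices sizes min_layers max_layers out) := by unfold Spec_make_layer_choices; infer_instance

-- ===== CLAIM (what is proved, stated in full; the proofs are below) =====
def Claim_equal_make_layer_choices : Prop := ∀ (sizes : List Int) (min_layers : Int) (max_layers : Int), Dom_make_layer_choices sizes min_layers max_layers → Pre_make_layer_choices sizes min_layers max_layers → Spec_make_layer_choices sizes min_layers max_layers (make_layer_choices sizes min_layers max_layers)

-- ===== LEMMAS AND PROOFS =====

-- the non-increasing combinations of length m, in A's (lexicographic product) order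
def pvFP (sizes : List Int) (m : Nat) : List (List Int) :=
  (pvProd sizes m).filter (fun c => !pvAnyInc c)

-- A's index-based filter computes exactly "not non-increasing" (¬ IsChain (· ≥ ·)).
theorem pvAnyInc_cons₂ (a b : Int) (t : List Int) :
    pvAnyInc (a :: b :: t) = (decide (a < b) || pvAnyInc (b :: t)) := by
  simp only [pvAnyInc, List.length_cons, Nat.add_sub_cancel, List.range_succ_eq_map,
    List.any_cons, List.any_map, Function.comp_def]
  rfl

theorem pvAnyInc_eq_false_iff (c : List Int) :
    pvAnyInc c = false ↔ List.IsChain (· ≥ ·) c := by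
  induction c with
  | nil => simp [pvAnyInc]
  | cons a t ih =>
    cases t with
    | nil => simp [pvAnyInc]
    | cons b t' =>
      rw [pvAnyInc_cons₂, List.isChain_cons_cons]
      simp only [Bool.or_eq_false_iff, decide_eq_false_iff_not, not_lt, ih]

-- a fold whose step is the identity on every element of the list
theorem foldl_fixed {α β : Type} (f : β → α → β) (l : List α)
    (h : ∀ d a, a ∈ l → f d a = d) : ∀ d, l.foldl f d = d := by
  induction l with
  | nil => intro d; rfl
  | cons x xs ih =>
    intro d
    rw [List.foldl_cons, h d x (List.mem_cons_self), ih]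
    intro d a ha; exact h d a (List.mem_cons_of_mem _ ha)

-- a fold that skips exactly the elements a filter drops
theorem foldl_if_filter {α β : Type} (g : β → α → β) (p : α → Bool) (l : List α) :
    ∀ d, l.foldl (fun d c => if p c then d else g d c) d = (l.filter (fun c => !p c)).foldl g d := by
  induction l with
  | nil => intro d; rfl
  | cons x xs ih =>
    intro d
    rw [List.foldl_cons, List.filter_cons]
    cases hx : p x <;> simp [ih]

-- flatMap over a list may drop the elements contributing []
theorem flatMap_filter_of_nil {α β : Type} (q : α → Bool) (f : α → List β) (l : List α)
    (h : ∀ r ∈ l, q r = false → f r = []) : l.flatMap f = (l.filter q).flatMap f := by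
  induction l with
  | nil => rfl
  | cons x xs ih =>
    have ih' := ih (fun r hr => h r (List.mem_cons_of_mem _ hr))
    rw [List.flatMap_cons, List.filter_cons]
    cases hx : q x with
    | true => simp [ih']
    | false => simp [h x (List.mem_cons_self) hx, ih']

-- a filter over a map, written as a flatMap of singletons
theorem filter_map_eq_flatMap {α β : Type} (p : β → Bool) (f : α → β) (l : List α) :
    (l.map f).filter p = l.flatMap (fun x => if p (f x) then [f x] else []) := by
  induction l with
  | nil => rfl
  | cons x xs ih =>
    rw [List.map_cons, List.filter_cons, List.flatMap_cons, ← ih]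
    cases hx : p (f x) <;> simp

-- itertools.product also enumerates lexicographically by extension on the right
theorem pvProd_snoc (sizes : List Int) (n : Nat) :
    pvProd sizes (n + 1) = (pvProd sizes n).flatMap (fun r => sizes.map (fun s => r ++ [s])) := by
  induction n with
  | zero =>
    rw [show pvProd sizes 1 = sizes.flatMap (fun x => [[x]]) from rfl,
      show pvProd sizes 0 = [[]] from rfl]
    induction sizes with
    | nil => rfl
    | cons a t iht => simp_all
  | succ n ih =>
    show sizes.flatMap (fun x => (pvProd sizes (n + 1)).map (fun r => x :: r)) = _
    conv_rhs =>
      rw [show pvProd sizes (n + 1) =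
        sizes.flatMap (fun x => (pvProd sizes n).map (fun r => x :: r)) from rfl]
    rw [List.flatMap_assoc]
    refine List.flatMap_congr (fun x _ => ?_)
    rw [List.flatMap_map, ih, List.map_flatMap]
    refine List.flatMap_congr (fun r _ => ?_)
    simp

-- appending to a non-increasing list stays non-increasing exactly when pvCond holds
theorem pvAnyInc_snoc_of_chain (r : List Int) (s : Int) (h : pvAnyInc r = false) :
    (!pvAnyInc (r ++ [s])) = pvCond r s := by
  have hr := (pvAnyInc_eq_false_iff r).mp h
  cases hc : pvCond r s with
  | true =>
    have : List.IsChain (· ≥ ·) (r ++ [s]) := by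
      rw [List.isChain_append]
      refine ⟨hr, by simp, ?_⟩
      intro x hx y hy
      simp only [List.head?_cons, Option.mem_def, Option.some.injEq] at hy
      subst hy
      unfold pvCond at hc
      cases hlast : r.getLast? with
      | none => rw [hlast] at hx; simp at hx
      | some b =>
        rw [hlast] at hx hc
        simp only [Option.mem_def, Option.some.injEq] at hx
        simp only [decide_eq_true_eq] at hc
        omega
    rw [(pvAnyInc_eq_false_iff _).mpr this]
    rfl
  | false =>
    unfold pvCond at hc
    cases hlast : r.getLast? with
    | none => rw [hlast] at hc; simp at hc
    | some b =>
      rw [hlast] at hc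
      simp only [decide_eq_false_iff_not, not_le] at hc
      have : ¬ List.IsChain (· ≥ ·) (r ++ [s]) := by
        rw [List.isChain_append]
        rintro ⟨_, _, h3⟩
        have := h3 b (by rw [hlast]; rfl) s (by rfl)
        omega
      cases hA : pvAnyInc (r ++ [s]) with
      | true => rfl
      | false => exact absurd ((pvAnyInc_eq_false_iff _).mp hA) this

-- a list with an increase keeps it after appending
theorem pvAnyInc_snoc_of_bad (r : List Int) (s : Int) (h : pvAnyInc r = true) :
    pvAnyInc (r ++ [s]) = true := by
  cases hA : pvAnyInc (r ++ [s]) with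
  | true => rfl
  | false =>
    have := (pvAnyInc_eq_false_iff _).mp hA
    rw [List.isChain_append] at this
    have hr := (pvAnyInc_eq_false_iff r).mpr this.1
    rw [h] at hr; exact absurd hr (by simp)

-- one round over the valid rows produces exactly the next level of A's filtered product
theorem pvExtend_pvFP (sizes : List Int) (n : Nat) :
    pvExtend sizes (pvFP sizes n) = pvFP sizes (n + 1) := by
  unfold pvFP
  rw [pvProd_snoc, List.filter_flatMap]
  rw [flatMap_filter_of_nil (fun c => !pvAnyInc c)
      (fun r => (sizes.map (fun s => r ++ [s])).filter (fun c => !pvAnyInc c))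
      (pvProd sizes n)
      (fun r _ hq => by
        simp only [Bool.not_eq_false'] at hq
        rw [List.filter_eq_nil_iff]
        intro c hc
        simp only [List.mem_map] at hc
        obtain ⟨s, _, rfl⟩ := hc
        simp [pvAnyInc_snoc_of_bad r s hq])]
  unfold pvExtend
  refine List.flatMap_congr (fun r hr => ?_)
  have hrF : pvAnyInc r = false := by
    have := List.of_mem_filter hr
    simpa using this
  rw [filter_map_eq_flatMap]
  refine List.flatMap_congr (fun s _ => ?_)
  rw [pvAnyInc_snoc_of_chain r s hrF]

-- invariant of B's loop: after the lengths 0..k-1, the rows are A's filtered product of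
-- length k and the dict holds the emissions of every processed length ≥ min_layers
theorem pvLoopB_eq (sizes : List Int) (mn : Int) (k : Nat) (d0 : PySem.Dict String (List Int)) :
    (PySem.List.pyRange 0 (k : Int) 1).foldl (pvStepB sizes mn) (d0, [[]]) =
      ((PySem.List.pyRange 0 (k : Int) 1).foldl
        (fun d L => if mn ≤ L then (pvFP sizes L.toNat).foldl
            (fun d combo => d.insert (pvKey combo) combo) d else d) d0,
       pvFP sizes k) := by
  induction k with
  | zero =>
    rw [PySem.List.pyRange_one_eq_nil (by omega)]
    rfl
  | succ k ih =>
    have hcast : ((k + 1 : Nat) : Int) = (k : Int) + 1 := by push_cast; ring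
    rw [hcast, PySem.List.pyRange_one_succ_right (show (0:Int) ≤ (k : Int) by omega),
      List.foldl_append, List.foldl_append, ih, List.foldl_cons, List.foldl_nil,
      List.foldl_cons, List.foldl_nil]
    have htn : (k : Int).toNat = k := by omega
    unfold pvStepB
    rw [pvExtend_pvFP, htn]

-- ===== VERDICT (by name: the statement is the Claim_ definition above) =====
theorem make_layer_choices_spec : Claim_equal_make_layer_choices := by
  intro sizes mn mx _ hpre
  unfold Spec_make_layer_choices make_layer_choices make_layer_choices_alt
  by_cases hmx : mx < mn
  · -- the requested layer range is empty on both sides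
    rw [if_pos hmx, PySem.List.pyRange_one_eq_nil (show mx + 1 ≤ mn by omega)]
    rfl
  · rw [if_neg hmx]
    have hmn : 0 ≤ mn := hpre.resolve_right hmx
    have hk : ((mx + 1).toNat : Int) = mx + 1 := by omega
    have hloop := pvLoopB_eq sizes mn (mx + 1).toNat (PySem.Dict.empty : PySem.Dict String (List Int))
    rw [hk] at hloop
    have hloop1 : ((PySem.List.pyRange 0 (mx + 1) 1).foldl (pvStepB sizes mn)
        ((PySem.Dict.empty : PySem.Dict String (List Int)), [[]])).1 =
        (PySem.List.pyRange 0 (mx + 1) 1).foldl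
          (fun d L => if mn ≤ L then (pvFP sizes L.toNat).foldl
              (fun d combo => d.insert (pvKey combo) combo) d else d) PySem.Dict.empty := by
      rw [hloop]
    rw [hloop1]
    have hA : (PySem.List.pyRange mn (mx + 1) 1).foldl
      (fun d L => (pvProd sizes L.toNat).foldl
        (fun d combo => if pvAnyInc combo then d else d.insert (pvKey combo) combo) d)
      PySem.Dict.empty =
      (PySem.List.pyRange mn (mx + 1) 1).foldl
        (fun d L => (pvFP sizes L.toNat).foldl
        (fun d combo => d.insert (pvKey combo) combo) d) PySem.Dict.empty :=
      PySem.List.foldl_congr_mem _ _ _ _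
      (fun acc L _ => foldl_if_filter
        (fun d combo => d.insert (pvKey combo) combo) pvAnyInc (pvProd sizes L.toNat) acc)
    rw [hA]
    rw [PySem.List.pyRange_one_append 0 mn (mx + 1) (by omega) (by omega), List.foldl_append]
    rw [foldl_fixed
      (fun d L => if mn ≤ L then (pvFP sizes L.toNat).foldl
        (fun d combo => d.insert (pvKey combo) combo) d else d)
      (PySem.List.pyRange 0 mn)
      (fun d L hL => by
      beta_reduce
      rw [if_neg (not_le.mpr (PySem.List.mem_pyRange_one.mp hL).2)])
      PySem.Dict.empty]
    refine congrArg PySem.Dict.items ?_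
    exact (PySem.List.foldl_congr_mem (PySem.List.pyRange mn (mx + 1))
      (fun d L => (pvFP sizes L.toNat).foldl (fun d combo => d.insert (pvKey combo) combo) d)
      (fun d L => if mn ≤ L then (pvFP sizes L.toNat).foldl
        (fun d combo => d.insert (pvKey combo) combo) d else d)
      PySem.Dict.empty
      (fun acc L hL => by
      beta_reduce
      rw [if_pos (PySem.List.mem_pyRange_one.mp hL).1]))
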